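-- pv_equiv track=rewrite | github.com/Futrell/rfutils | rfutils/nl/cleanspoken.py | remove_duplicate_sequences
-- ===== SOURCE A (Python) =====
-- def remove_duplicate_sequences(iterable, seq_len, key_fn=None):
--     """ remove duplicate sequences
--
--     Removes adjacent duplicate sequences of given length from an iterable.
--
--     Example:
--         >>> remove_duplicate_sequences("abababcccc", 2)
--         ['a', 'b', 'c', 'c']
--
--     """
--     if key_fn is None:
--         key_fn = lambda x:x
--
--     sequence = list(iterable)
--
--     for i, item in enumerate(sequence):
--         this_seq = list(map(key_fn, sequence[i:(i+seq_len)]))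
--         while True:
--             next_seq = list(map(key_fn, sequence[(i+seq_len):(i+2*seq_len)]))
--             if this_seq == next_seq:
--                 del sequence[(i+seq_len):(i+2*seq_len)]
--             else:
--                 break
--     return sequence
-- ===== SOURCE B (Python) =====
-- def remove_duplicate_sequences(iterable, seq_len, key_fn=None):
--     """Single forward pass with a stack: push each item; whenever the top
--     seq_len keys equal the seq_len keys below them, drop the top block.
--     O(n*seq_len) instead of repeated list deletions with re-slicing."""
--     if key_fn is None:
--         key_fn = lambda x: x
--     out = []
--     for x in iterable:
--         out.append(x)
--         if seq_len >= 1 and 2 * seq_len <= len(out) and \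
--            list(map(key_fn, out[-seq_len:])) == list(map(key_fn, out[-2 * seq_len:-seq_len])):
--             del out[-seq_len:]
--     return out
-- ===== Notes on version B (the rewrite author's own statement) =====
-- stated objective: faster
-- what changed: Replaces the index-loop with repeated slice re-mapping and in-place block deletions by a single forward pass that keeps a stack and drops the top seq_len-block whenever it equals the block right below it.
-- outside the precondition, e.g. on remove_duplicate_sequences('ab', -1): A returns ['a', 'b'], B returns ['a', 'b']
import Mathlib
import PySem

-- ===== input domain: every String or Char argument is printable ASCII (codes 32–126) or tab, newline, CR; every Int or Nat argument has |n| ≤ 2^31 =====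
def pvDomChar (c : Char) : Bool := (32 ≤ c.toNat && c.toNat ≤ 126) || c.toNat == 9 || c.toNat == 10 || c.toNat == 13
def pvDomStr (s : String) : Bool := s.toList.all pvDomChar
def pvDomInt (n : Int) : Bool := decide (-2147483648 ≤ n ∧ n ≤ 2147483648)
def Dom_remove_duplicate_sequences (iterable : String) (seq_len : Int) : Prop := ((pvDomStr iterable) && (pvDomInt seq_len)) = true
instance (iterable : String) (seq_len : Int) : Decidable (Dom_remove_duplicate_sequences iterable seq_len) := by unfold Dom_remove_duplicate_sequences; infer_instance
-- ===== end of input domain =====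

-- B replaces A's index loop with repeated slicing and in-place block deletions by a one-pass
-- stack that drops the top seq_len-block when it repeats the block below it (objective: faster).

-- ===== PORT A =====
-- inner 'while True' of A; the fuel only makes the Python loop total (inside Pre_ it never runs out)
def pvInnerA (L : Int) (i : Nat) (this : List Char) : List Char → Nat → List Char
  | seq, 0 => seq
  | seq, fuel+1 =>
    let next := PySem.List.slice seq (some ((i : Int) + L)) (some ((i : Int) + 2*L))
    if this = next then
      pvInnerA L i this
        (PySem.List.slice seq none (some ((i : Int) + L)) ++
         PySem.List.slice seq (some ((i : Int) + 2*L)) none) fuel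
    else seq

-- 'for i, item in enumerate(sequence)' over the shrinking list; the fuel bounds the iteration count
def pvOuterA (L : Int) : Nat → Nat → List Char → List Char
  | 0, _, seq => seq
  | fuel+1, i, seq =>
    if i < seq.length then
      pvOuterA L fuel (i+1)
        (pvInnerA L i (PySem.List.slice seq (some (i : Int)) (some ((i : Int) + L))) seq (seq.length + 1))
    else seq

def remove_duplicate_sequences (iterable : String) (seq_len : Int) : List String :=
  (pvOuterA seq_len (iterable.toList.length + 1) 0 iterable.toList).map (fun c => String.ofList [c])

-- ===== PORT B =====
def pvStepB (L : Int) (out : List Char) (x : Char) : List Char :=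
  let t := out ++ [x]
  if 1 ≤ L ∧ 2*L ≤ (t.length : Int) ∧
     PySem.List.slice t (some (-L)) none = PySem.List.slice t (some (-(2*L))) (some (-L)) then
    PySem.List.slice t none (some ((t.length : Int) - L))
  else t

def remove_duplicate_sequences_alt (iterable : String) (seq_len : Int) : List String :=
  (iterable.toList.foldl (pvStepB seq_len) []).map (fun c => String.ofList [c])

-- ===== PRECONDITION & SPEC =====
-- Pre_ excludes non-positive seq_len on a nonempty iterable: there the Python A loops forever,
-- except on an accidental narrow band (|seq_len| < len ≤ 2|seq_len|) where its negative-slice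
-- arithmetic happens to return the input unchanged.
def Pre_remove_duplicate_sequences (iterable : String) (seq_len : Int) : Prop :=
  1 ≤ seq_len ∨ iterable.toList = []
instance (iterable : String) (seq_len : Int) : Decidable (Pre_remove_duplicate_sequences iterable seq_len) := by
  unfold Pre_remove_duplicate_sequences; infer_instance

def pvWitness_remove_duplicate_sequences : String × Int := ("abababcccc", 2)

def Spec_remove_duplicate_sequences (iterable : String) (seq_len : Int) (out : List String) : Prop :=
  out = remove_duplicate_sequences_alt iterable seq_len
instance (iterable : String) (seq_len : Int) (out : List String) : Decidable (Spec_remove_duplicate_sequences iterable seq_len out) := by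
  unfold Spec_remove_duplicate_sequences; infer_instance

-- ===== CLAIM (what is proved, stated in full; the proofs are below) =====
def Claim_equal_remove_duplicate_sequences : Prop :=
  ∀ (iterable : String) (seq_len : Int), Dom_remove_duplicate_sequences iterable seq_len →
    Pre_remove_duplicate_sequences iterable seq_len →
    Spec_remove_duplicate_sequences iterable seq_len (remove_duplicate_sequences iterable seq_len)

-- ===== LEMMAS AND PROOFS =====

-- ---------- clean proof-side model ----------

/-- A's collapse, done/rest form: one leftmost deletion step at a time. -/
def pvA0 (l : Nat) (w : List Char) : List Char :=
  if h : 1 ≤ l ∧ 2*l ≤ w.length ∧ w.take l = (w.drop l).take l then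
    pvA0 l (w.take l ++ w.drop (2*l))
  else
    match w with
    | [] => []
    | c :: t => c :: pvA0 l t
termination_by w.length
decreasing_by
  · simp; omega
  · simp

/-- just A's inner while loop -/
def pvShrink (l : Nat) (w : List Char) : List Char :=
  if h : 1 ≤ l ∧ 2*l ≤ w.length ∧ w.take l = (w.drop l).take l then
    pvShrink l (w.take l ++ w.drop (2*l))
  else w
termination_by w.length
decreasing_by
  · simp; omega

/-- B's per-character step, clean form -/
def pvPop (l : Nat) (u : List Char) : List Char :=
  if 2*l ≤ u.length ∧ u.drop (u.length - l) = (u.drop (u.length - 2*l)).take l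
  then u.take (u.length - l) else u

def pvStepC (l : Nat) (out : List Char) (x : Char) : List Char := pvPop l (out ++ [x])

def pvB (l : Nat) (w : List Char) : List Char := w.foldl (pvStepC l) []

-- ---------- pointwise access ----------

def pvPg (s : List Char) (i : Nat) : Char := s.getD i ' '

theorem pvPg_getElem (w : List Char) (i : Nat) (h : i < w.length) : pvPg w i = w[i] := by
  simp [pvPg, List.getD_eq_getElem?_getD, List.getElem?_eq_getElem h]

theorem pvPg_take (w : List Char) (i m : Nat) (h : i < m) : pvPg (w.take m) i = pvPg w i := by
  simp [pvPg, List.getD_eq_getElem?_getD, List.getElem?_take_of_lt h]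

theorem pvPg_append_left (u v : List Char) (i : Nat) (h : i < u.length) :
    pvPg (u ++ v) i = pvPg u i := by
  simp [pvPg, List.getD_eq_getElem?_getD, List.getElem?_append_left h]

theorem pvPg_append_right (u v : List Char) (k : Nat) :
    pvPg (u ++ v) (u.length + k) = pvPg v k := by
  rw [pvPg, pvPg, List.getD_eq_getElem?_getD, List.getD_eq_getElem?_getD,
      List.getElem?_append_right (by omega)]
  simp

theorem pvPg_cons_succ (c : Char) (s : List Char) (i : Nat) : pvPg (c :: s) (i+1) = pvPg s i := rfl

theorem pvWindow_iff (w : List Char) (a b n : Nat) (ha : a + n ≤ w.length) (hb : b + n ≤ w.length) :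
    (w.drop a).take n = (w.drop b).take n ↔ ∀ j, j < n → pvPg w (a+j) = pvPg w (b+j) := by
  constructor
  · intro h j hj
    have h1 : pvPg ((w.drop a).take n) j = pvPg w (a+j) := by
      rw [pvPg_take _ _ _ hj]; simp [pvPg, List.getD_eq_getElem?_getD, List.getElem?_drop]
    have h2 : pvPg ((w.drop b).take n) j = pvPg w (b+j) := by
      rw [pvPg_take _ _ _ hj]; simp [pvPg, List.getD_eq_getElem?_getD, List.getElem?_drop]
    rw [← h1, ← h2, h]
  · intro h
    apply List.ext_getElem
    · simp; omega
    · intro i h1 h2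
      simp only [List.getElem_take, List.getElem_drop]
      have hi : i < n := by simp at h1; omega
      have := h i hi
      rw [pvPg_getElem _ _ (by omega), pvPg_getElem _ _ (by omega)] at this
      exact this

def pvPer (l : Nat) (s : List Char) : Prop := ∀ i, i + l < s.length → pvPg s (i+l) = pvPg s i

theorem pvChain (l : Nat) (p : List Char) (hP : pvPer l p) :
    ∀ k a, a + k*l < p.length → pvPg p (a + k*l) = pvPg p a := by
  intro k
  induction k with
  | zero => intro a _; simp
  | succ k ih =>
    intro a h
    have h1 : a + (k+1)*l = (a + k*l) + l := by ring
    rw [h1, hP (a + k*l) (by omega), ih a (by omega)]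

-- ---------- basic facts about pvA0 / pvShrink ----------

theorem pvA0_nil (l : Nat) : pvA0 l [] = [] := by
  rw [pvA0]
  have : ¬ (1 ≤ l ∧ 2*l ≤ ([] : List Char).length ∧ ([] : List Char).take l = (([] : List Char).drop l).take l) := by
    rintro ⟨h1, h2, -⟩; simp at h2; omega
  rw [dif_neg this]

theorem pvA0_fire (l : Nat) (w : List Char) (h1 : 1 ≤ l) (h2 : 2*l ≤ w.length)
    (h3 : w.take l = (w.drop l).take l) :
    pvA0 l w = pvA0 l (w.take l ++ w.drop (2*l)) := by
  rw [pvA0, dif_pos ⟨h1, h2, h3⟩]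

theorem pvA0_nofire (l : Nat) (c : Char) (t : List Char)
    (h : ¬ (2*l ≤ (c :: t).length ∧ (c :: t).take l = ((c :: t).drop l).take l)) :
    pvA0 l (c :: t) = c :: pvA0 l t := by
  rw [pvA0, dif_neg (by tauto)]

theorem pvShrink_fire (l : Nat) (w : List Char) (h1 : 1 ≤ l) (h2 : 2*l ≤ w.length)
    (h3 : w.take l = (w.drop l).take l) :
    pvShrink l w = pvShrink l (w.take l ++ w.drop (2*l)) := by
  rw [pvShrink, dif_pos ⟨h1, h2, h3⟩]

theorem pvShrink_nofire (l : Nat) (w : List Char)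
    (h : ¬ (1 ≤ l ∧ 2*l ≤ w.length ∧ w.take l = (w.drop l).take l)) :
    pvShrink l w = w := by
  rw [pvShrink, dif_neg h]

theorem pvA0_short (l : Nat) (hl : 1 ≤ l) (w : List Char) (h : w.length < 2*l) : pvA0 l w = w := by
  induction w with
  | nil => exact pvA0_nil l
  | cons c t ih =>
    rw [pvA0_nofire l c t (by rintro ⟨h2, -⟩; omega)]
    rw [ih (by simp at h ⊢; omega)]

theorem pvA0_match (l : Nat) (hl : 1 ≤ l) (w : List Char) :
    pvA0 l w = (match pvShrink l w with
                | [] => []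
                | c :: t => c :: pvA0 l t) := by
  generalize hn : w.length = n
  induction n using Nat.strong_induction_on generalizing w with
  | _ n ih =>
    by_cases h : 1 ≤ l ∧ 2*l ≤ w.length ∧ w.take l = (w.drop l).take l
    · rw [pvA0_fire l w h.1 h.2.1 h.2.2, pvShrink_fire l w h.1 h.2.1 h.2.2]
      exact ih ((w.take l ++ w.drop (2*l)).length) (by simp; omega) _ rfl
    · rw [pvShrink_nofire l w h, pvA0, dif_neg h]
      cases w <;> rfl

theorem pvShrink_length_le (l : Nat) (w : List Char) : (pvShrink l w).length ≤ w.length := by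
  generalize hn : w.length = n
  induction n using Nat.strong_induction_on generalizing w with
  | _ n ih =>
    by_cases h : 1 ≤ l ∧ 2*l ≤ w.length ∧ w.take l = (w.drop l).take l
    · rw [pvShrink_fire l w h.1 h.2.1 h.2.2]
      have := ih ((w.take l ++ w.drop (2*l)).length) (by simp; omega) _ rfl
      simp at this ⊢
      omega
    · rw [pvShrink_nofire l w h]; omega

theorem pvShrink_ne_nil (l : Nat) (w : List Char) (h : w ≠ []) : pvShrink l w ≠ [] := by
  generalize hn : w.length = n
  induction n using Nat.strong_induction_on generalizing w with
  | _ n ih =>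
    by_cases hf : 1 ≤ l ∧ 2*l ≤ w.length ∧ w.take l = (w.drop l).take l
    · rw [pvShrink_fire l w hf.1 hf.2.1 hf.2.2]
      apply ih ((w.take l ++ w.drop (2*l)).length) (by simp; omega)
      · intro hnil
        have := congrArg List.length hnil
        simp only [List.length_append, List.length_take, List.length_nil, List.length_drop] at this
        obtain ⟨h1, h2, -⟩ := hf
        omega
      · rfl
    · rw [pvShrink_nofire l w hf]; exact h

-- ---------- stack invariant ----------

def pvNF (l : Nat) (s : List Char) : Prop :=
  ∀ j, j + 2*l ≤ s.length → (s.drop j).take l ≠ (s.drop (j+l)).take l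

def pvINV (l : Nat) (p s : List Char) : Prop :=
  pvNF l s ∧
  (s = p ∨ (l ≤ s.length ∧ s.length < p.length ∧ (p.length - s.length) % l = 0 ∧ s.take l = p.take l)) ∧
  (l+1 ≤ s.length → pvPer l s → s = p.take s.length ∧ pvPer l p) ∧
  (s.length = l → s ≠ p → s = p.take l ∧ pvPer l p)

theorem pv_chain_mod (l : Nat) (p : List Char) (hPp : pvPer l p) (a b : Nat)
    (hb : b < p.length) (hab : a ≤ b) (hmod : (b - a) % l = 0) : pvPg p b = pvPg p a := by
  have hmul : (b-a)/l * l = b - a := Nat.div_mul_cancel (Nat.dvd_of_mod_eq_zero hmod)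
  rw [show b = a + (b-a)/l*l by omega]
  exact pvChain l p hPp _ a (by omega)

theorem pvPer_append (l : Nat) (hl : 1 ≤ l) (p : List Char) (x : Char) (hPp : pvPer l p)
    (hx : l ≤ p.length → pvPg p (p.length - l) = x) : pvPer l (p ++ [x]) := by
  intro i hi
  simp only [List.length_append, List.length_cons, List.length_nil] at hi
  by_cases h2 : i + l < p.length
  · rw [pvPg_append_left p [x] (i+l) h2, pvPg_append_left p [x] i (by omega)]
    exact hPp i h2
  · have hip : i = p.length - l := by omega
    have e1 : pvPg (p++[x]) (i+l) = x := by
      rw [show i + l = p.length + 0 by omega, pvPg_append_right]; rfl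
    rw [e1, pvPg_append_left p [x] i (by omega), hip]
    exact (hx (by omega)).symm

theorem pv_take_succ_eq (p s : List Char) (x : Char) (hsp : s = p.take s.length)
    (hlt : s.length < p.length) (hx : pvPg p s.length = x) :
    s ++ [x] = (p ++ [x]).take (s.length + 1) := by
  rw [List.take_append_of_le_length (by omega), List.take_succ_eq_append_getElem hlt]
  rw [← hsp, ← hx, pvPg_getElem p s.length hlt]

theorem pv_inv_step (l : Nat) (hl : 1 ≤ l) (p s : List Char) (x : Char)
    (h : pvINV l p s) : pvINV l (p ++ [x]) (pvStepC l s x) := by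
  obtain ⟨hNF, hB, hC, hC2⟩ := h
  have hts : ∀ i, i < s.length → pvPg (s ++ [x]) i = pvPg s i :=
    fun i hi => pvPg_append_left s [x] i hi
  have htx : pvPg (s ++ [x]) s.length = x := by
    have h0 := pvPg_append_right s [x] 0
    simpa using h0
  have htlen : (s ++ [x]).length = s.length + 1 := by simp
  by_cases hc : 2*l ≤ (s ++ [x]).length ∧
      (s ++ [x]).drop ((s ++ [x]).length - l) = ((s ++ [x]).drop ((s ++ [x]).length - 2*l)).take l
  · -- POP case
    obtain ⟨hc1, hc2⟩ := hc
    have hsl : 2*l ≤ s.length + 1 := by omega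
    have hq : pvStepC l s x = (s ++ [x]).take ((s ++ [x]).length - l) := by
      rw [pvStepC, pvPop, if_pos ⟨hc1, hc2⟩]
    rw [hq, htlen, show s.length + 1 - l = s.length + 1 - l from rfl]
    set t := s ++ [x] with htdef
    set m := s.length + 1 - l with hmdef
    have hml : l ≤ m := by omega
    have hmlen : (t.take m).length = m := by rw [List.length_take]; simp [htdef]; omega
    have hw : ∀ j, j < l → pvPg t (s.length + 1 - l + j) = pvPg t (s.length + 1 - 2*l + j) := by
      have hh : (t.drop (t.length - l)).take l = (t.drop (t.length - 2*l)).take l := by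
        rw [List.take_of_length_le (by rw [List.length_drop]; omega)]
        exact hc2
      have := (pvWindow_iff t (t.length - l) (t.length - 2*l) l (by omega) (by omega)).1 hh
      intro j hj
      have hthis := this j hj
      rw [show t.length - l = s.length + 1 - l by rw [htlen],
          show t.length - 2*l = s.length + 1 - 2*l by rw [htlen]] at hthis
      exact hthis
    have hwin : ∀ a, a + l ≤ m → ((t.take m).drop a).take l = (s.drop a).take l := by
      intro a ha
      rw [List.drop_take, List.take_take, min_eq_left (by omega), htdef,
          List.drop_append_of_le_length (by omega),
          List.take_append_of_le_length (by rw [List.length_drop]; omega)]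
    refine ⟨?_, ?_, ?_, ?_⟩
    · -- NF
      intro j hj
      rw [hmlen] at hj
      rw [hwin j (by omega), hwin (j+l) (by omega)]
      exact hNF j (by omega)
    · -- B: right disjunct
      refine Or.inr ⟨by rw [hmlen]; omega, ?_, ?_, ?_⟩
      · rw [hmlen]
        simp only [List.length_append, List.length_cons, List.length_nil]
        rcases hB with hsp | ⟨-, hlt, -, -⟩
        · have hsl' : s.length = p.length := by rw [hsp]
          omega
        · omega
      · have he : (p ++ [x]).length - (t.take m).length = (p.length - s.length) + l := by
          rw [hmlen]
          simp only [List.length_append, List.length_cons, List.length_nil]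
          rcases hB with hsp | ⟨-, hlt, -, -⟩
          · have hsl' : s.length = p.length := by rw [hsp]
            omega
          · omega
        rw [he, Nat.add_mod_right]
        rcases hB with hsp | ⟨-, -, hD, -⟩
        · rw [hsp]; simp
        · exact hD
      · rw [List.take_take, min_eq_left hml, htdef,
            List.take_append_of_le_length (by omega)]
        have hsp' : s.take l = p.take l := by
          rcases hB with hsp | ⟨-, -, -, htk⟩
          · rw [hsp]
          · exact htk
        rw [hsp', List.take_append_of_le_length ?hlp]
        case hlp =>
          rcases hB with hsp | ⟨-, hlt, -, -⟩
          · rw [← hsp]; omega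
          · omega
    · -- C
      intro hlen hPer
      exfalso
      rw [hmlen] at hlen
      have h2ls : 2*l ≤ s.length := by omega
      have hPt : pvPer l t := by
        intro i hi
        rw [htlen] at hi
        by_cases hi2 : i + l < m
        · have g1 := pvPg_take t (i+l) m hi2
          have g2 := pvPg_take t i m (by omega)
          have h3 := hPer i (by rw [hmlen]; omega)
          rw [g1, g2] at h3
          exact h3
        · have hj : i - (s.length + 1 - 2*l) < l := by omega
          have h4 := hw (i - (s.length + 1 - 2*l)) hj
          rw [show s.length + 1 - l + (i - (s.length + 1 - 2*l)) = i + l by omega,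
              show s.length + 1 - 2*l + (i - (s.length + 1 - 2*l)) = i by omega] at h4
          exact h4
      apply hNF 0 (by omega)
      rw [List.drop_zero]
      have hg : ((s.drop 0).take l) = (s.drop l).take l := by
        rw [pvWindow_iff s 0 l l (by omega) (by omega)]
        intro j hj
        have e1 : pvPg s (0 + j) = pvPg t j := by
          rw [show (0:Nat) + j = j by omega]; exact (hts j (by omega)).symm
        have e2 : pvPg s (l + j) = pvPg t (j + l) := by
          rw [show l + j = j + l by omega]; exact (hts (j+l) (by omega)).symm
        rw [e1, e2]
        exact (hPt j (by omega)).symm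
      rw [List.drop_zero] at hg
      rw [show (0:Nat) + l = l by omega]
      exact hg
    · -- C2
      intro hml2 hne
      rw [hmlen] at hml2
      have hs2 : s.length = 2*l - 1 := by omega
      have ht2 : t.length = 2*l := by rw [htlen]; omega
      have hPt : pvPer l t := by
        intro i hi
        rw [ht2] at hi
        have h4 := hw i (by omega)
        rw [show s.length + 1 - l + i = i + l by omega,
            show s.length + 1 - 2*l + i = i by omega] at h4
        exact h4
      have hml' : m = l := by omega
      rcases hB with hsp | ⟨hls, hlt, hD, htk⟩
      · -- pristine: t = p ++ [x]
        have htp : t = p ++ [x] := by rw [htdef, hsp]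
        constructor
        · rw [hml', htp]
        · rw [← htp]; exact hPt
      · -- corrupt
        have hPs : pvPer l s := by
          intro i hi
          have e1 := hts (i+l) (by omega)
          have e2 := hts i (by omega)
          rw [← e1, ← e2]
          exact hPt i (by omega)
        have hstp : s = p.take (2*l - 1) ∧ pvPer l p := by
          by_cases hll : l + 1 ≤ s.length
          · have := hC hll hPs
            rwa [hs2] at this
          · have hls1 : s.length = l := by omega
            have hl1 : l = 1 := by omega
            obtain ⟨ha, hb⟩ := hC2 hls1 (by intro hEq; rw [hEq] at hlt; omega)
            exact ⟨by rw [ha]; congr 1; omega, hb⟩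
        obtain ⟨hstp, hPp⟩ := hstp
        constructor
        · rw [hml', htdef, List.take_append_of_le_length (by omega), hstp,
              List.take_take, min_eq_left (by omega),
              List.take_append_of_le_length (by omega)]
        · apply pvPer_append l hl p x hPp
          intro hlp
          have hx1 : x = pvPg t (2*l - 1) := by
            rw [← htx, hs2]
          have hx2 : pvPg t (2*l - 1) = pvPg t (l - 1) := by
            have h5 := hPt (l-1) (by omega)
            rw [show l - 1 + l = 2*l - 1 by omega] at h5
            exact h5
          have hx3 : pvPg t (l - 1) = pvPg s (l - 1) := hts (l-1) (by omega)
          have hx4 : pvPg s (l - 1) = pvPg p (l - 1) := by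
            rw [hstp, pvPg_take p (l-1) (2*l-1) (by omega)]
          have hx5 : pvPg p (p.length - l) = pvPg p (l - 1) := by
            apply pv_chain_mod l p hPp (l-1) (p.length - l) (by omega) (by omega)
            have : p.length - l - (l - 1) = p.length - s.length := by omega
            rw [this]
            exact hD
          rw [hx5, ← hx4, ← hx3, ← hx2, ← hx1]
  · -- NOPOP case
    have hq : pvStepC l s x = s ++ [x] := by
      rw [pvStepC, pvPop, if_neg hc]
    rw [hq]
    set t := s ++ [x] with htdef
    refine ⟨?_, ?_, ?_, ?_⟩
    · -- NF
      intro j hj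
      rw [htlen] at hj
      by_cases hj2 : j + 2*l ≤ s.length
      · have e1 : (t.drop j).take l = (s.drop j).take l := by
          rw [htdef, List.drop_append_of_le_length (by omega),
              List.take_append_of_le_length (by rw [List.length_drop]; omega)]
        have e2 : (t.drop (j+l)).take l = (s.drop (j+l)).take l := by
          rw [htdef, List.drop_append_of_le_length (by omega),
              List.take_append_of_le_length (by rw [List.length_drop]; omega)]
        rw [e1, e2]
        exact hNF j hj2
      · intro heq
        apply hc
        refine ⟨by omega, ?_⟩
        rw [show t.length - l = j + l by omega, show t.length - 2*l = j by omega]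
        exact ((List.take_of_length_le
          (show (t.drop (j+l)).length ≤ l by rw [List.length_drop]; omega)).symm.trans heq.symm)
    · -- B
      rcases hB with hsp | ⟨hls, hlt, hD, htk⟩
      · exact Or.inl (by rw [htdef, hsp])
      · refine Or.inr ⟨by rw [htlen]; omega, by simp [htlen]; omega, ?_, ?_⟩
        · have he : (p ++ [x]).length - t.length = p.length - s.length := by
            simp only [List.length_append, List.length_cons, List.length_nil, htlen]
            omega
          rw [he]; exact hD
        · rw [htdef, List.take_append_of_le_length (by omega), htk,
              List.take_append_of_le_length (by omega)]
    · -- C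
      intro hlen hPt
      rw [htlen] at hlen
      have htle : t.length ≤ 2*l - 1 := by
        by_contra hcon
        apply hc
        refine ⟨by omega, ?_⟩
        have hww : ∀ j, j < l → pvPg t (t.length - l + j) = pvPg t (t.length - 2*l + j) := by
          intro j hj
          have h5 := hPt (t.length - 2*l + j) (by omega)
          rw [show t.length - 2*l + j + l = t.length - l + j by omega] at h5
          exact h5
        have h6 := (pvWindow_iff t (t.length - l) (t.length - 2*l) l (by omega) (by omega)).2 hww
        rw [List.take_of_length_le (by rw [List.length_drop]; omega)] at h6
        exact h6
      rcases hB with hsp | ⟨hls, hlt, hD, htk⟩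
      · have htp : t = p ++ [x] := by rw [htdef, hsp]
        constructor
        · rw [htp]
          exact (List.take_length).symm
        · rw [← htp]; exact hPt
      · have hPs : pvPer l s := by
          intro i hi
          have e1 := hts (i+l) (by omega)
          have e2 := hts i (by omega)
          rw [← e1, ← e2]
          exact hPt i (by rw [htlen]; omega)
        by_cases hsl2 : s.length = l
        · obtain ⟨hq1, hPp⟩ := hC2 hsl2 (by intro hEq; rw [hEq] at hlt; omega)
          have hx0 : x = pvPg p 0 := by
            have e0 := hPt 0 (by rw [htlen]; omega)
            rw [show (0:Nat) + l = l by omega] at e0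
            rw [← htx, hsl2, e0, hts 0 (by omega), hq1, pvPg_take p 0 l (by omega)]
          constructor
          · rw [htdef, htlen]
            have hq1' : s = p.take s.length := by rw [hsl2]; exact hq1
            apply pv_take_succ_eq p s x hq1' hlt
            rw [hsl2]
            rw [hx0]
            apply pv_chain_mod l p hPp 0 l (by omega) (by omega) (by simp)
          · apply pvPer_append l hl p x hPp
            intro hlp
            rw [hx0]
            apply pv_chain_mod l p hPp 0 (p.length - l) (by omega) (by omega)
            have : p.length - l - 0 = p.length - s.length := by omega
            rw [this]; exact hD
        · have hll : l + 1 ≤ s.length := by omega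
          obtain ⟨hq1, hPp⟩ := hC hll hPs
          have hxv : x = pvPg p (s.length - l) := by
            have e0 := hPt (s.length - l) (by rw [htlen]; omega)
            rw [show s.length - l + l = s.length by omega] at e0
            have e1 : pvPg s (s.length - l) = pvPg p (s.length - l) :=
              (congrArg (fun ys => pvPg ys (s.length - l)) hq1).trans
                (pvPg_take p (s.length - l) s.length (by omega))
            rw [← htx, e0, hts (s.length - l) (by omega), e1]
          constructor
          · rw [htdef, htlen]
            apply pv_take_succ_eq p s x hq1 hlt
            rw [hxv]
            apply pv_chain_mod l p hPp (s.length - l) s.length (by omega) (by omega)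
              (by rw [show s.length - (s.length - l) = l by omega]; simp)
          · apply pvPer_append l hl p x hPp
            intro hlp
            rw [hxv]
            apply pv_chain_mod l p hPp (s.length - l) (p.length - l) (by omega) (by omega)
            have : p.length - l - (s.length - l) = p.length - s.length := by omega
            rw [this]; exact hD
    · -- C2
      intro hml2 hne
      rw [htlen] at hml2
      rcases hB with hsp | ⟨hls, hlt, hD, htk⟩
      · exfalso; apply hne; rw [htdef, hsp]
      · exfalso; omega

theorem pv_inv_holds (l : Nat) (hl : 1 ≤ l) (p : List Char) : pvINV l p (pvB l p) := by
  induction p using List.reverseRecOn with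
  | nil =>
    refine ⟨?_, Or.inl rfl, ?_, ?_⟩
    · intro j hj; simp [pvB] at hj; omega
    · intro hlen hPer; exfalso; simp [pvB] at hlen
    · intro _ hne; exfalso; exact hne rfl
  | append_singleton p x ih =>
    have : pvB l (p ++ [x]) = pvStepC l (pvB l p) x := by
      simp only [pvB, List.foldl_append, List.foldl_cons, List.foldl_nil]
    rw [this]
    exact pv_inv_step l hl p (pvB l p) x ih

-- ---------- the crux: a pop at height exactly 2l cannot newly appear on a cons ----------

theorem pv_crux (l : Nat) (hl : 1 ≤ l) (d c : Char) (t : List Char)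
    (ht : 2*l ≤ t.length + 1)
    (hlen : (pvB l t).length = 2*l - 2)
    (hnf : ¬ ((d :: t).take l = ((d :: t).drop l).take l)) :
    ¬ ((d :: (pvB l t ++ [c])).drop l = (d :: (pvB l t ++ [c])).take l) := by
  intro hEc
  obtain ⟨hNF, hB, hC, hC2⟩ := pv_inv_holds l hl t
  set s := pvB l t with hs
  have htl : 2*l - 1 ≤ t.length := by omega
  rcases hB with hsp | ⟨hls, hlt, hD, htake⟩
  · rw [hsp] at hlen; omega
  have hl2 : 2 ≤ l := by omega
  set W := d :: (s ++ [c]) with hW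
  have hWlen : W.length = 2*l := by simp [hW]; omega
  have hj : ∀ j, j < l → pvPg W (l + j) = pvPg W (0 + j) := by
    have h1 : (W.drop l).take l = (W.drop 0).take l := by
      rw [List.drop_zero, List.take_of_length_le (by rw [List.length_drop, hWlen]; omega)]
      exact hEc
    exact (pvWindow_iff W l 0 l (by omega) (by omega)).1 h1
  have hWs : ∀ i, i < 2*l - 2 → pvPg W (i+1) = pvPg s i := by
    intro i hi
    rw [hW, pvPg_cons_succ]
    exact pvPg_append_left s [c] i (by omega)
  have per_s : pvPer l s := by
    intro i hi
    rw [hlen] at hi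
    have h1 : pvPg s (i+l) = pvPg W (i+l+1) := (hWs (i+l) (by omega)).symm
    have h2 : pvPg W (l + (i+1)) = pvPg W (0 + (i+1)) := hj (i+1) (by omega)
    have h3 : pvPg W (i+1) = pvPg s i := hWs i (by omega)
    rw [h1, show i+l+1 = l + (i+1) by ring, h2]
    simpa using h3
  have hst : s = t.take (2*l - 2) ∧ pvPer l t := by
    by_cases hll : l + 1 ≤ s.length
    · have := hC hll per_s
      rwa [hlen] at this
    · have hleq : l = 2 := by omega
      obtain ⟨ha, hb⟩ := hC2 (by omega) (by intro heq; rw [heq] at hlen; omega)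
      refine ⟨?_, hb⟩
      rw [ha]
      congr 1
      omega
  obtain ⟨hst, hPt⟩ := hst
  apply hnf
  have hgoal : ((d::t).drop 0).take l = ((d::t).drop l).take l := by
    rw [pvWindow_iff (d::t) 0 l l (by simp; omega) (by simp; omega)]
    intro j hj'
    match j with
    | 0 =>
      have e1 : pvPg (d::t) 0 = d := rfl
      have e2 : pvPg (d::t) (l + 0) = pvPg t (l-1) := by
        rw [show l + 0 = (l-1) + 1 by omega, pvPg_cons_succ]
      have e3 : pvPg t (l-1) = pvPg s (l-1) := by
        rw [hst, pvPg_take t (l-1) (2*l-2) (by omega)]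
      have e4 : pvPg s (l-1) = pvPg W l := by
        rw [show l = (l-1) + 1 by omega]
        exact (hWs (l-1) (by omega)).symm
      have e5 : pvPg W (l + 0) = pvPg W 0 := by simpa using hj 0 (by omega)
      have e6 : pvPg W 0 = d := rfl
      rw [show (0:Nat) + 0 = 0 by rfl, e1, e2, e3, e4]
      rw [show l = l + 0 by omega, e5, e6]
    | j' + 1 =>
      have e1 : pvPg (d::t) (0 + (j'+1)) = pvPg t j' := by
        rw [show 0 + (j'+1) = j' + 1 by omega, pvPg_cons_succ]
      have e2 : pvPg (d::t) (l + (j'+1)) = pvPg t (l+j') := by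
        rw [show l + (j'+1) = (l+j') + 1 by omega, pvPg_cons_succ]
      have e3 : pvPg t (j' + l) = pvPg t j' := hPt j' (by omega)
      rw [e1, e2, show l + j' = j' + l by omega, e3]

  simpa using hgoal

-- ---------- main equivalence on the clean model ----------

theorem pv_master (l : Nat) (hl : 1 ≤ l) :
    ∀ n : Nat,
      (∀ v c, v.length ≤ n → pvA0 l (v ++ [c]) = pvPop l (pvA0 l v ++ [c])) ∧
      (∀ v, v.length ≤ n → pvA0 l v = pvB l v) := by
  intro n
  induction n using Nat.strong_induction_on with
  | _ n IH =>
    constructor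
    · intro v c hv
      by_cases h1 : v.length + 1 < 2*l
      · rw [pvA0_short l hl (v++[c]) (by simp; omega), pvA0_short l hl v (by omega), pvPop,
            if_neg (by rintro ⟨hc, -⟩; simp at hc; omega)]
      · by_cases h2 : v.length + 1 = 2*l
        · -- v.length = 2l - 1
          have hA0v : pvA0 l v = v := pvA0_short l hl v (by omega)
          rw [hA0v]
          have hwlen : (v ++ [c]).length = 2*l := by simp; omega
          by_cases hf : (v++[c]).take l = ((v++[c]).drop l).take l
          · have hdl : (v++[c]).drop l = ((v++[c]).drop l).take l :=
              (List.take_of_length_le (by rw [List.length_drop, hwlen]; omega)).symm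
            rw [pvA0_fire l (v++[c]) hl (by omega) hf]
            have hd2 : (v++[c]).drop (2*l) = [] := List.drop_eq_nil_of_le (by omega)
            rw [hd2, List.append_nil,
               pvA0_short l hl ((v++[c]).take l) (by rw [List.length_take]; omega), pvPop,
               if_pos ⟨by omega, by
                  rw [hwlen, show 2*l - 2*l = 0 by omega, show 2*l - l = l by omega, List.drop_zero, hf]
                  exact hdl⟩]
            rw [hwlen, show 2*l - l = l by omega]
          · rcases v with _ | ⟨d, t⟩
            · simp at h2; omega
            · rw [show (d::t) ++ [c] = d :: (t++[c]) from rfl,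
                 pvA0_nofire l d (t++[c]) (by
                   rintro ⟨-, hEq⟩
                   exact hf (by rw [show (d::t) ++ [c] = d :: (t++[c]) from rfl]; exact hEq)),
                 pvA0_short l hl (t++[c]) (by simp at h2 ⊢; omega), pvPop,
                 if_neg (by
                   rintro ⟨-, hEq⟩
                   apply hf
                   rw [show (d::(t++[c])) = (d::t) ++ [c] from rfl, hwlen,
                       show 2*l - 2*l = 0 by omega, show 2*l - l = l by omega, List.drop_zero] at hEq
                   show List.take l ((d::t) ++ [c]) = List.take l (List.drop l ((d::t) ++ [c]))
                   rw [hEq, List.take_take, Nat.min_self])]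
        · -- v.length ≥ 2l
          have hvlen : 2*l ≤ v.length := by omega
          have hn2 : 2 ≤ n := by omega
          by_cases hf : v.take l = (v.drop l).take l
          · have hwtake : (v++[c]).take l = v.take l := List.take_append_of_le_length (by omega)
            have hwdrop : (v++[c]).drop l = v.drop l ++ [c] := List.drop_append_of_le_length (by omega)
            have hfw : (v++[c]).take l = ((v++[c]).drop l).take l := by
              rw [hwtake, hwdrop, List.take_append_of_le_length (by rw [List.length_drop]; omega), ← hf]
            rw [pvA0_fire l (v++[c]) hl (by simp; omega) hfw]
            have hrw : (v++[c]).take l ++ (v++[c]).drop (2*l) = (v.take l ++ v.drop (2*l)) ++ [c] := by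
              rw [hwtake, List.drop_append_of_le_length (by omega), List.append_assoc]
            rw [hrw]
            have hlen' : (v.take l ++ v.drop (2*l)).length ≤ n - 1 := by
              simp only [List.length_append, List.length_take, List.length_drop]; omega
            rw [(IH (n-1) (by omega)).1 _ c hlen', ← pvA0_fire l v hl hvlen hf]
          · rcases v with _ | ⟨d, t⟩
            · simp at hvlen; omega
            · simp only [List.length_cons] at hvlen hv
              have hA0 : pvA0 l (d::t) = d :: pvA0 l t :=
                pvA0_nofire l d t (by rintro ⟨-, hEq⟩; exact hf hEq)
              have htlen : t.length ≤ n - 1 := by omega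
              have hstep : pvA0 l ((d::t) ++ [c]) = d :: pvA0 l (t ++ [c]) := by
                rw [show (d::t) ++ [c] = d :: (t++[c]) from rfl]
                apply pvA0_nofire l d (t++[c])
                rintro ⟨-, hEq⟩
                apply hf
                rw [show (d::(t++[c])) = (d::t) ++ [c] from rfl,
                    List.take_append_of_le_length (by simp; omega),
                    List.drop_append_of_le_length (by simp; omega),
                    List.take_append_of_le_length (by rw [List.length_drop]; omega)] at hEq
                exact hEq
              rw [hstep, (IH (n-1) (by omega)).1 t c htlen, hA0,
                  (IH (n-1) (by omega)).2 t htlen,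
                  show (d :: pvB l t) ++ [c] = d :: (pvB l t ++ [c]) from rfl]
              set u := pvB l t ++ [c] with hu
              by_cases hm : 2*l ≤ u.length
              · have hcond : ((d::u).drop ((d::u).length - l) = ((d::u).drop ((d::u).length - 2*l)).take l)
                    ↔ (u.drop (u.length - l) = (u.drop (u.length - 2*l)).take l) := by
                  rw [show (d::u).length - l = (u.length - l) + 1 by simp; omega,
                      show (d::u).length - 2*l = (u.length - 2*l) + 1 by simp; omega,
                      List.drop_succ_cons, List.drop_succ_cons]
                by_cases hc2 : u.drop (u.length - l) = (u.drop (u.length - 2*l)).take l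
                · rw [pvPop, pvPop, if_pos ⟨hm, hc2⟩, if_pos ⟨by simp; omega, hcond.2 hc2⟩,
                      show (d::u).length - l = (u.length - l) + 1 by simp; omega,
                      List.take_succ_cons]
                · rw [pvPop, pvPop, if_neg (by rintro ⟨-, hx⟩; exact hc2 hx),
                      if_neg (by rintro ⟨-, hx⟩; exact hc2 (hcond.1 hx))]
              · have hul : u.length = (pvB l t).length + 1 := by rw [hu]; simp
                by_cases hm2 : u.length + 1 = 2*l
                · -- the crux case: |u| = 2l-1
                  have hulen : (pvB l t).length = 2*l - 2 := by omega
                  have hcrux := pv_crux l hl d c t (by omega) hulen hf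
                  rw [← hu] at hcrux
                  have hdul : (d::u).length = 2*l := by simp; omega
                  rw [pvPop, pvPop, if_neg (by rintro ⟨hx, -⟩; omega),
                      if_neg (by
                        rintro ⟨-, hx⟩
                        apply hcrux
                        rw [hdul, show 2*l - l = l by omega, show 2*l - 2*l = 0 by omega,
                            List.drop_zero] at hx
                        exact hx)]
                · rw [pvPop, pvPop, if_neg (by rintro ⟨hx, -⟩; exact hm hx),
                      if_neg (by rintro ⟨hx, -⟩; simp only [List.length_cons] at hx; omega)]
    · intro v hv
      rcases List.eq_nil_or_concat v with rfl | ⟨v₀, c, rfl⟩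
      · rw [pvA0_nil]; rfl
      · rw [List.concat_eq_append] at hv ⊢
        have hn1 : 1 ≤ n := by simp at hv; omega
        have hlen : v₀.length ≤ n - 1 := by simp at hv; omega
        rw [(IH (n-1) (by omega)).1 v₀ c hlen, (IH (n-1) (by omega)).2 v₀ hlen]
        simp only [pvB, List.foldl_append, List.foldl_cons, List.foldl_nil, pvStepC]

theorem pv_main (l : Nat) (hl : 1 ≤ l) (w : List Char) : pvA0 l w = pvB l w :=
  (pv_master l hl w.length).2 w le_rfl

-- ---------- bridges between the ports and the clean model ----------

theorem pv_drop_app (pre rest : List Char) (k : Nat) :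
    (pre ++ rest).drop (pre.length + k) = rest.drop k := by
  exact List.drop_length_add_append k

theorem pv_take_app (pre rest : List Char) (k : Nat) :
    (pre ++ rest).take (pre.length + k) = pre ++ rest.take k := by
  exact List.take_length_add_append k

theorem pv_innerA_eq (l : Nat) (hl : 1 ≤ l) :
    ∀ (fuel : Nat) (pre rest : List Char), rest ≠ [] → rest.length < fuel →
      pvInnerA (l : Int) pre.length (rest.take l) (pre ++ rest) fuel = pre ++ pvShrink l rest := by
  intro fuel
  induction fuel with
  | zero => intro pre rest _ hfuel; exact absurd hfuel (Nat.not_lt_zero _)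
  | succ fuel ih =>
    intro pre rest hrest hfuel
    have hrl : 0 < rest.length := List.length_pos_of_ne_nil hrest
    have c1 : ((pre.length : Int) + l) = (((pre.length + l : Nat)) : Int) := by push_cast; ring
    have c2 : ((pre.length : Int) + 2*l) = (((pre.length + 2*l : Nat)) : Int) := by push_cast; ring
    have e_next : PySem.List.slice (pre ++ rest) (some ((pre.length : Int) + l)) (some ((pre.length : Int) + 2*l)) = (rest.drop l).take l := by
      rw [c1, c2, PySem.List.slice_natCast, pv_drop_app]
      congr 1
      omega
    have e_head : PySem.List.slice (pre ++ rest) none (some ((pre.length : Int) + l)) = pre ++ rest.take l := by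
      rw [c1, PySem.List.slice_to_natCast, pv_take_app]
    have e_tail : PySem.List.slice (pre ++ rest) (some ((pre.length : Int) + 2*l)) none = rest.drop (2*l) := by
      rw [c2, PySem.List.slice_from_natCast, pv_drop_app]
    simp only [pvInnerA]
    rw [e_next, e_head, e_tail]
    by_cases heq : rest.take l = (rest.drop l).take l
    · rw [if_pos heq]
      have hLen := congrArg List.length heq
      simp only [List.length_take, List.length_drop] at hLen
      have h2l : 2*l ≤ rest.length := by omega
      have hres : (pre ++ rest.take l) ++ rest.drop (2*l) = pre ++ (rest.take l ++ rest.drop (2*l)) :=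
        List.append_assoc _ _ _
      rw [hres]
      have htk : (rest.take l ++ rest.drop (2*l)).take l = rest.take l := by
        rw [List.take_append_of_le_length (by simp; omega), List.take_take]
        simp
      have hcall := ih pre (rest.take l ++ rest.drop (2*l))
        (by intro hnil
            have := congrArg List.length hnil
            simp only [List.length_append, List.length_take, List.length_nil, List.length_drop] at this
            omega)
        (by simp only [List.length_append, List.length_take, List.length_drop]; omega)
      rw [htk] at hcall
      rw [hcall, pvShrink_fire l rest hl h2l heq]
    · rw [if_neg heq, pvShrink_nofire l rest (by rintro ⟨-, -, h⟩; exact heq h)]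

theorem pv_outerA_eq (l : Nat) (hl : 1 ≤ l) :
    ∀ (fuel : Nat) (pre rest : List Char), rest.length < fuel →
      pvOuterA (l : Int) fuel pre.length (pre ++ rest) = pre ++ pvA0 l rest := by
  intro fuel
  induction fuel with
  | zero => intro pre rest hfuel; exact absurd hfuel (Nat.not_lt_zero _)
  | succ fuel ih =>
    intro pre rest hfuel
    by_cases hrest : rest = []
    · subst hrest
      simp only [pvOuterA]
      rw [if_neg (by simp), pvA0_nil]
    · have hrl : 0 < rest.length := List.length_pos_of_ne_nil hrest
      simp only [pvOuterA]
      rw [if_pos (by simp; omega)]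
      have c1 : ((pre.length : Int) + l) = (((pre.length + l : Nat)) : Int) := by push_cast; ring
      have hthis : PySem.List.slice (pre ++ rest) (some (pre.length : Int)) (some ((pre.length : Int) + l)) = rest.take l := by
        rw [c1, PySem.List.slice_natCast]
        have hd : (pre ++ rest).drop pre.length = rest := by
          have h0 := pv_drop_app pre rest 0
          simpa using h0
        rw [hd]
        simp
      rw [hthis, pv_innerA_eq l hl ((pre ++ rest).length + 1) pre rest hrest (by simp)]
      obtain ⟨c, t', hw'⟩ : ∃ c t', pvShrink l rest = c :: t' := by
        rcases hsh : pvShrink l rest with _ | ⟨c, t'⟩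
        · exact absurd hsh (pvShrink_ne_nil l rest hrest)
        · exact ⟨c, t', rfl⟩
      have hshlen : (pvShrink l rest).length ≤ rest.length := pvShrink_length_le l rest
      rw [hw']
      have hsplit : pre ++ c :: t' = (pre ++ [c]) ++ t' := by simp
      have hidx : pre.length + 1 = (pre ++ [c]).length := by simp
      rw [hsplit, hidx, ih (pre ++ [c]) t'
        (by rw [hw'] at hshlen; simp at hshlen; omega)]
      rw [pvA0_match l hl rest, hw']
      simp

theorem pv_bridgeA (iterable : String) (l : Nat) (hl : 1 ≤ l) :
    remove_duplicate_sequences iterable (l : Int) =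
      (pvA0 l iterable.toList).map (fun c => String.ofList [c]) := by
  unfold remove_duplicate_sequences
  congr 1
  have := pv_outerA_eq l hl (iterable.toList.length + 1) [] iterable.toList (by omega)
  simpa using this

theorem pv_stepB_eq (l : Nat) (hl : 1 ≤ l) (out : List Char) (x : Char) :
    pvStepB (l : Int) out x = pvStepC l out x := by
  show (if _ then _ else _) = pvPop l (out ++ [x])
  rw [pvPop]
  set t := out ++ [x] with ht
  by_cases hm : 2*l ≤ t.length
  · have e1 : PySem.List.slice t (some (-(l:Int))) none = t.drop (t.length - l) :=
      PySem.List.slice_from_neg_natCast t l (by omega)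
    have e2 : PySem.List.slice t (some (-(2*(l:Int)))) (some (-(l:Int))) =
        (t.drop (t.length - 2*l)).take l := by
      have h2 : -(2*(l:Int)) = -(((2*l : Nat)):Int) := by push_cast; ring
      rw [h2]
      simp only [PySem.List.slice, PySem.List.clampIdx_neg_natCast _ _ (by omega : 0 < 2*l),
        PySem.List.clampIdx_neg_natCast _ _ (by omega : 0 < l)]
      congr 1
      omega
    have e3 : PySem.List.slice t none (some ((t.length:Int) - l)) = t.take (t.length - l) := by
      have h3 : (t.length:Int) - l = (((t.length - l : Nat)):Int) := by omega
      rw [h3, PySem.List.slice_to_natCast]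
    rw [e1, e2, e3]
    by_cases he : t.drop (t.length - l) = (t.drop (t.length - 2*l)).take l
    · rw [if_pos ⟨by exact_mod_cast hl, by exact_mod_cast hm, he⟩, if_pos ⟨hm, he⟩]
    · rw [if_neg (by rintro ⟨-, -, h⟩; exact he h), if_neg (by rintro ⟨-, h⟩; exact he h)]
  · rw [if_neg, if_neg]
    · rintro ⟨h, -⟩; exact hm h
    · rintro ⟨-, h, -⟩
      have : (2*l : Int) ≤ (t.length : Int) := by exact_mod_cast h
      omega

theorem pv_bridgeB (iterable : String) (l : Nat) (hl : 1 ≤ l) :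
    remove_duplicate_sequences_alt iterable (l : Int) =
      (pvB l iterable.toList).map (fun c => String.ofList [c]) := by
  unfold remove_duplicate_sequences_alt pvB
  have hfun : pvStepB (l : Int) = pvStepC l :=
    funext fun out => funext fun x => pv_stepB_eq l hl out x
  rw [hfun]

-- ===== VERDICT (by name: the statement is the Claim_ definition above) =====
theorem remove_duplicate_sequences_spec : Claim_equal_remove_duplicate_sequences := by
  intro iterable seq_len _hdom hpre
  unfold Spec_remove_duplicate_sequences
  rcases hpre with hL | hempty
  · have hl : seq_len = ((seq_len.toNat : Nat) : Int) := by omega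
    rw [hl, pv_bridgeA iterable seq_len.toNat (by omega), pv_bridgeB iterable seq_len.toNat (by omega),
        pv_main seq_len.toNat (by omega)]
  · unfold remove_duplicate_sequences remove_duplicate_sequences_alt
    rw [hempty]
    rfl
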